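-- pv_equiv track=rewrite | github.com/stokuj/sorting-visualization | python/sorting_algorithms.py | quick_gen
-- ===== SOURCE A (Python) =====
-- def quick_gen(arr):
--     arr = arr.copy()
--     stack = [(0, len(arr)-1)]
--     while stack:
--         low, high = stack.pop()
--         if low >= high:
--             continue
--         pivot = arr[high]
--         i = low - 1
--         yield arr.copy(), low, high, pivot, []
--         for j in range(low, high):
--             if arr[j] <= pivot:
--                 i += 1
--                 arr[i], arr[j] = arr[j], arr[i]
--                 yield arr.copy(), low, high, pivot, [j, i]
--         arr[i+1], arr[high] = arr[high], arr[i+1]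
--         yield arr.copy(), low, high, pivot, [i+1, high]
--         stack.extend([(low, i), (i+2, high)])
-- ===== SOURCE B (Python) =====
-- def quick_gen(arr):
--     a = arr.copy()
--
--     def partition(low, high):
--         pivot = a[high]
--         i = low - 1
--         steps = [(a.copy(), low, high, pivot, [])]
--         for j in range(low, high):
--             if a[j] <= pivot:
--                 i += 1
--                 a[i], a[j] = a[j], a[i]
--                 steps.append((a.copy(), low, high, pivot, [j, i]))
--         a[i + 1], a[high] = a[high], a[i + 1]
--         steps.append((a.copy(), low, high, pivot, [i + 1, high]))
--         return i, steps
--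
--     def quick(low, high):
--         if low >= high:
--             return
--         i, steps = partition(low, high)
--         yield from steps
--         # right half first: matches the LIFO order of A's explicit stack
--         yield from quick(i + 2, high)
--         yield from quick(low, i)
--
--     yield from quick(0, len(a) - 1)
-- ===== Notes on version B (the rewrite author's own statement) =====
-- stated objective: alternative
-- what changed: Replaced A's explicit work-stack while-loop with a recursive generator (partition helper + quick(low, high) that recurses on the right half before the left, reproducing the stack's LIFO order).
import Mathlib
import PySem

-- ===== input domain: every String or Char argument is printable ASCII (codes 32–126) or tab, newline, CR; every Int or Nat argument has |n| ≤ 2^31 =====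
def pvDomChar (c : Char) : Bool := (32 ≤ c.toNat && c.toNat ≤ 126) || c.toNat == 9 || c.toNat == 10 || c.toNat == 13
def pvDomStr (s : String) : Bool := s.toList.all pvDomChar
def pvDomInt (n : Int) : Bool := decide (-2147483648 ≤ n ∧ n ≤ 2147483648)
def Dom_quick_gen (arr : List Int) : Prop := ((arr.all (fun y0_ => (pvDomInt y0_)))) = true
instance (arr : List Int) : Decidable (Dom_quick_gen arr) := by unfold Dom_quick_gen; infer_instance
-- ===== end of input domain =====

-- B replaces A's explicit work-stack loop by a recursive quicksort helper that recurses on the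
-- right half before the left half (= the stack's LIFO order); same snapshots, same cost (objective: alternative).

-- `a[i], a[j] = a[j], a[i]` on a Python list; indices are always in range in these programs,
-- on out-of-range (never reached) pySetD leaves the list unchanged.
def pySwap (a : List Int) (i j : Int) : List Int :=
  PySem.List.pySetD (PySem.List.pySetD a i (PySem.List.pyGetD a j 0)) j (PySem.List.pyGetD a i 0)

-- the Lomuto partition loop body (textually identical in A and B): state = (arr, i, yields so far)
def lomutoBody (low high pivot : Int)
    (st : List Int × Int × List (List Int × Int × Int × Int × List Int)) (j : Int) :
    List Int × Int × List (List Int × Int × Int × Int × List Int) :=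
  if PySem.List.pyGetD st.1 j 0 ≤ pivot then
    let a' := pySwap st.1 (st.2.1 + 1) j
    (a', st.2.1 + 1, st.2.2 ++ [(a', low, high, pivot, [j, st.2.1 + 1])])
  else st

-- bounds on the running index i of the partition loop (used by both ports' termination proofs)
theorem lomuto_i_bound (low high pivot : Int) :
    ∀ (js : List Int) (a : List Int) (i : Int)
      (out : List (List Int × Int × Int × Int × List Int)),
      i ≤ (js.foldl (lomutoBody low high pivot) (a, i, out)).2.1 ∧
      (js.foldl (lomutoBody low high pivot) (a, i, out)).2.1 ≤ i + (js.length : Int) := by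
  intro js
  induction js with
  | nil => intro a i out; simp
  | cons j js ih =>
    intro a i out
    simp only [List.foldl_cons, lomutoBody]
    split
    · have h := ih (pySwap a (i + 1) j) (i + 1)
        (out ++ [(pySwap a (i + 1) j, low, high, pivot, [j, i + 1])])
      simp only [List.length_cons]
      constructor
      · omega
      · have := h.2; push_cast at this ⊢; omega
    · have h := ih a i out
      simp only [List.length_cons]
      constructor
      · exact h.1
      · have := h.2; push_cast at this ⊢; omega

-- decrease of the stack measure when a trivial interval is popped / when the two halves are pushed
-- (root-level lemmas so the ports' termination proofs stay small)
theorem length_pyRange_one (a b : Int) : ((PySem.List.pyRange a b 1).length : Int) = max (b - a) 0 := by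
  simp only [PySem.List.pyRange, one_ne_zero, ↓reduceIte, one_mul, zero_lt_one, add_sub_cancel_right,
    EuclideanDomain.div_one, List.length_map, List.length_range, Nat.cast_ite, Int.ofNat_toNat, CharP.cast_eq_zero]
  omega

-- ===== PORT A =====
-- A's while-loop over the explicit stack; the Lean list holds the Python stack reversed
-- (stack.pop() = head, stack.extend([x, y]) = y :: x :: ·).
def stackMeasure (st : List (Int × Int)) : Nat :=
  (st.map (fun p => 2 * (p.2 - p.1 + 1).toNat + 1)).sum

theorem stack_dec_pop (low high : Int) (rest : List (Int × Int)) :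
    stackMeasure rest < stackMeasure ((low, high) :: rest) := by
  simp only [stackMeasure, List.map_cons, List.sum_cons]; omega

theorem stack_dec_core (low high i : Int) (h0 : ¬ low ≥ high) (h2 : low - 1 ≤ i)
    (h4 : i ≤ high - 1) :
    2 * (high - (i + 2) + 1).toNat + 1 + (2 * (i - low + 1).toNat + 1) <
      2 * (high - low + 1).toNat + 1 := by
  have b1 : (0:Int) ≤ high - (i + 2) + 1 := by omega
  have b2 : (0:Int) ≤ i - low + 1 := by omega
  have b3 : (0:Int) ≤ high - low + 1 := by omega
  rw [← Nat.cast_lt (α := Int)]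
  push_cast [Int.toNat_of_nonneg b1, Int.toNat_of_nonneg b2, Int.toNat_of_nonneg b3]
  omega

theorem stack_dec_push (low high i : Int) (rest : List (Int × Int)) (h0 : ¬ low ≥ high)
    (h2 : low - 1 ≤ i) (h3 : i ≤ low - 1 + ((PySem.List.pyRange low high 1).length : Int)) :
    stackMeasure ((i + 2, high) :: (low, i) :: rest) < stackMeasure ((low, high) :: rest) := by
  have hl := length_pyRange_one low high
  have h4 : i ≤ high - 1 := by omega
  simp only [stackMeasure, List.map_cons, List.sum_cons]
  rw [← Nat.add_assoc]
  exact Nat.add_lt_add_right (stack_dec_core low high i h0 h2 h4) _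

def quick_gen_loop (a : List Int) (stack : List (Int × Int)) :
    List (List Int × Int × Int × Int × List Int) :=
  match stack with
  | [] => []
  | (low, high) :: rest =>
    if hge : low ≥ high then quick_gen_loop a rest
    else
      let pivot := PySem.List.pyGetD a high 0
      let r := (PySem.List.pyRange low high 1).foldl (lomutoBody low high pivot)
                 (a, low - 1, [(a, low, high, pivot, ([] : List Int))])
      let a2 := pySwap r.1 (r.2.1 + 1) high
      r.2.2 ++ [(a2, low, high, pivot, [r.2.1 + 1, high])]
        ++ quick_gen_loop a2 ((r.2.1 + 2, high) :: (low, r.2.1) :: rest)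
termination_by stackMeasure stack
decreasing_by
  · exact stack_dec_pop low high rest
  · have hb := lomuto_i_bound low high (PySem.List.pyGetD a high 0)
      (PySem.List.pyRange low high 1) a (low - 1) [(a, low, high, PySem.List.pyGetD a high 0, ([] : List Int))]
    exact stack_dec_push low high _ rest hge hb.1 hb.2

def quick_gen (arr : List Int) : List (List Int × Int × Int × Int × List Int) :=
  quick_gen_loop arr [(0, (arr.length : Int) - 1)]

-- ===== PORT B =====
-- B's `partition(low, high)`: returns (i, array after the pivot swap, the snapshots it yielded)
def quick_partition (a : List Int) (low high : Int) :
    Int × List Int × List (List Int × Int × Int × Int × List Int) :=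
  let pivot := PySem.List.pyGetD a high 0
  let r := (PySem.List.pyRange low high 1).foldl (lomutoBody low high pivot)
             (a, low - 1, [(a, low, high, pivot, ([] : List Int))])
  let a2 := pySwap r.1 (r.2.1 + 1) high
  (r.2.1, a2, r.2.2 ++ [(a2, low, high, pivot, [r.2.1 + 1, high])])

theorem quick_partition_fst_bound (a : List Int) (low high : Int) (h : low < high) :
    low - 1 ≤ (quick_partition a low high).1 ∧ (quick_partition a low high).1 ≤ high - 1 := by
  have hb := lomuto_i_bound low high (PySem.List.pyGetD a high 0)
    (PySem.List.pyRange low high 1) a (low - 1) [(a, low, high, PySem.List.pyGetD a high 0, ([] : List Int))]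
  have hl := length_pyRange_one low high
  simp only [quick_partition]
  exact ⟨hb.1, le_trans hb.2 (by rw [hl]; omega)⟩

-- B's recursive `quick(low, high)`: returns (array afterwards, snapshots yielded);
-- right half before left half, matching the stack's LIFO order.
theorem rec_dec_right (low high i : Int) (h0 : ¬ low ≥ high) (h2 : low - 1 ≤ i)
    (h3 : i ≤ high - 1) : (high - (i + 2) + 1).toNat < (high - low + 1).toNat := by
  have b1 : (0:Int) ≤ high - (i + 2) + 1 := by omega
  rw [← Nat.cast_lt (α := Int)]
  push_cast [Int.toNat_of_nonneg b1]
  omega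

theorem rec_dec_left (low high i : Int) (h0 : ¬ low ≥ high) (h2 : low - 1 ≤ i)
    (h3 : i ≤ high - 1) : (i - low + 1).toNat < (high - low + 1).toNat := by
  have b2 : (0:Int) ≤ i - low + 1 := by omega
  rw [← Nat.cast_lt (α := Int)]
  push_cast [Int.toNat_of_nonneg b2]
  omega

def quick_rec (a : List Int) (low high : Int) :
    List Int × List (List Int × Int × Int × Int × List Int) :=
  if hge : low ≥ high then (a, [])
  else
    let p := quick_partition a low high
    let rt := quick_rec p.2.1 (p.1 + 2) high
    let lf := quick_rec rt.1 low p.1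
    (lf.1, p.2.2 ++ (rt.2 ++ lf.2))
termination_by (high - low + 1).toNat
decreasing_by
  · have hb := quick_partition_fst_bound a low high (not_le.mp hge)
    exact rec_dec_right low high _ hge hb.1 hb.2
  · have hb := quick_partition_fst_bound a low high (not_le.mp hge)
    exact rec_dec_left low high _ hge hb.1 hb.2

def quick_gen_alt (arr : List Int) : List (List Int × Int × Int × Int × List Int) :=
  (quick_rec arr 0 ((arr.length : Int) - 1)).2

-- ===== PRECONDITION & SPEC =====
def Spec_quick_gen (arr : List Int) (out : List (List Int × Int × Int × Int × List Int)) : Prop := out = quick_gen_alt arr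
instance (arr : List Int) (out : List (List Int × Int × Int × Int × List Int)) : Decidable (Spec_quick_gen arr out) := by unfold Spec_quick_gen; infer_instance

-- ===== CLAIM (what is proved, stated in full; the proofs are below) =====
def Claim_equal_quick_gen : Prop := ∀ (arr : List Int), Dom_quick_gen arr → Spec_quick_gen arr (quick_gen arr)

-- ===== LEMMAS AND PROOFS =====

theorem stackMeasure_head_pos (low high : Int) (rest : List (Int × Int)) :
    1 ≤ stackMeasure ((low, high) :: rest) := by
  simp only [stackMeasure, List.map_cons, List.sum_cons]; omega

-- the key correspondence: processing the stack with head (low, high) = run B's recursion on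
-- (low, high), then continue the loop on the rest of the stack with the updated array
theorem loop_eq_rec : ∀ (n : Nat) (low high : Int) (rest : List (Int × Int)) (a : List Int),
    stackMeasure ((low, high) :: rest) ≤ n →
    quick_gen_loop a ((low, high) :: rest) =
      (quick_rec a low high).2 ++ quick_gen_loop (quick_rec a low high).1 rest := by
  intro n
  induction n with
  | zero =>
    intro low high rest a hle
    exact absurd hle (by have := stackMeasure_head_pos low high rest; omega)
  | succ n ih =>
    intro low high rest a hle
    by_cases h : low ≥ high
    · rw [quick_gen_loop, quick_rec]
      simp [h]
    · have hbound := quick_partition_fst_bound a low high (by omega)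
      rw [quick_gen_loop, quick_rec]
      simp only [h]
      set p := quick_partition a low high with hp
      have hA : quick_gen_loop p.2.1 ((p.1 + 2, high) :: (low, p.1) :: rest) =
          (quick_rec p.2.1 (p.1 + 2) high).2 ++
            quick_gen_loop (quick_rec p.2.1 (p.1 + 2) high).1 ((low, p.1) :: rest) := by
        apply ih
        simp only [stackMeasure, List.map_cons, List.sum_cons] at hle ⊢
        omega
      have hB : quick_gen_loop (quick_rec p.2.1 (p.1 + 2) high).1 ((low, p.1) :: rest) =
          (quick_rec (quick_rec p.2.1 (p.1 + 2) high).1 low p.1).2 ++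
            quick_gen_loop (quick_rec (quick_rec p.2.1 (p.1 + 2) high).1 low p.1).1 rest := by
        apply ih
        simp only [stackMeasure, List.map_cons, List.sum_cons] at hle ⊢
        omega
      -- A's inlined body is exactly p's components
      show p.2.2 ++ quick_gen_loop p.2.1 ((p.1 + 2, high) :: (low, p.1) :: rest) = _
      rw [hA, hB]
      simp [List.append_assoc]

-- ===== VERDICT (by name: the statement is the Claim_ definition above) =====
theorem quick_gen_spec : Claim_equal_quick_gen := by
  intro arr _
  unfold Spec_quick_gen quick_gen quick_gen_alt
  rw [loop_eq_rec (stackMeasure [(0, (arr.length : Int) - 1)]) 0 ((arr.length : Int) - 1) [] arr le_rfl]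
  rw [quick_gen_loop]
  simp
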